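-- pv_equiv track=rewrite | github.com/FlucsDeveloper/credit-ratings-service | app/scrapers/moodys.py | _is_valid_moodys_rating
-- ===== SOURCE A (Python) =====
-- def _is_valid_moodys_rating(rating: str) -> bool:
--     """
--     Validate if string is a proper Moody's rating.
--
--     Args:
--         rating: Rating string to validate
--
--     Returns:
--         True if valid Moody's rating format
--     """
--     # Moody's ratings: Aaa, Aa1-3, A1-3, Baa1-3, Ba1-3, B1-3, Caa1-3, Ca, C
--     valid_prefixes = ["Aaa", "Aa", "A", "Baa", "Ba", "B", "Caa", "Ca", "C"]
--
--     for prefix in valid_prefixes: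
--         if rating.startswith(prefix):
--             # Check suffix (should be nothing, or 1-3)
--             suffix = rating[len(prefix) :]
--             if suffix in ["", "1", "2", "3"]:
--                 return True
--
--     return False
-- ===== SOURCE B (Python) =====
-- _MOODYS_PREFIXES = {"Aaa", "Aa", "A", "Baa", "Ba", "B", "Caa", "Ca", "C"}
--
--
-- def _is_valid_moodys_rating(rating: str) -> bool:
--     if rating.endswith(("1", "2", "3")):
--         return rating[:-1] in _MOODYS_PREFIXES
--     return rating in _MOODYS_PREFIXES
-- ===== Notes on version B (the rewrite author's own statement) =====
-- stated objective: simpler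
-- what changed: Replaces the startswith-loop over prefixes (with per-prefix slicing and suffix checks) by normalizing once: strip a trailing grade digit if present and do a single set-membership lookup of the remaining base.
import Mathlib
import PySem

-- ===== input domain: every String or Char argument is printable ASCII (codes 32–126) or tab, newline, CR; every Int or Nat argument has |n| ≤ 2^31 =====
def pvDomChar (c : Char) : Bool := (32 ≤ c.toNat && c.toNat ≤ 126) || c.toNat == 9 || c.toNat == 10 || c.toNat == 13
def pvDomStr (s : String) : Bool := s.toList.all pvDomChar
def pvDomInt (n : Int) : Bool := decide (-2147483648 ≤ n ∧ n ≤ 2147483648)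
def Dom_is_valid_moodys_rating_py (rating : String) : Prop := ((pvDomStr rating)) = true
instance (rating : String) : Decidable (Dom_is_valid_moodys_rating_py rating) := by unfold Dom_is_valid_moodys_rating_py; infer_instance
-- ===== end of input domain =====

-- B replaces A's startswith-loop over prefixes by normalizing the suffix once (strip a trailing
-- grade digit, if any) and a single set-membership lookup of the base; objective: simpler.

-- ===== PORT A =====
-- valid_prefixes = ["Aaa", "Aa", "A", "Baa", "Ba", "B", "Caa", "Ca", "C"]
def pvValidPrefixes : List String := ["Aaa", "Aa", "A", "Baa", "Ba", "B", "Caa", "Ca", "C"]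

-- the 'for prefix in valid_prefixes:' loop (early return True inside)
def pvLoopA (rating : String) : List String → Bool
  | [] => false
  | p :: rest =>
      if PySem.Str.startswith rating p then
        let suffix := PySem.Str.slice rating (some (PySem.Str.len p)) none
        if (["", "1", "2", "3"] : List String).contains suffix then true
        else pvLoopA rating rest
      else pvLoopA rating rest

def is_valid_moodys_rating_py (rating : String) : Bool :=
  pvLoopA rating pvValidPrefixes

-- ===== PORT B =====
-- _MOODYS_PREFIXES = {"Aaa", "Aa", "A", "Baa", "Ba", "B", "Caa", "Ca", "C"}  (a set of distinct literals)
def pvMoodysPrefixSet : PySem.Set String :=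
  PySem.Set.ofList ["Aaa", "Aa", "A", "Baa", "Ba", "B", "Caa", "Ca", "C"]

def is_valid_moodys_rating_py_alt (rating : String) : Bool :=
  if PySem.Str.endswith rating "1" || PySem.Str.endswith rating "2" || PySem.Str.endswith rating "3" then
    pvMoodysPrefixSet.contains (PySem.Str.slice rating none (some (-1)))
  else
    pvMoodysPrefixSet.contains rating

-- ===== PRECONDITION & SPEC =====
def Spec_is_valid_moodys_rating_py (rating : String) (out : Bool) : Prop := out = is_valid_moodys_rating_py_alt rating
instance (rating : String) (out : Bool) : Decidable (Spec_is_valid_moodys_rating_py rating out) := by unfold Spec_is_valid_moodys_rating_py; infer_instance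

-- ===== CLAIM (what is proved, stated in full; the proofs are below) =====
def Claim_equal_is_valid_moodys_rating_py : Prop := ∀ (rating : String), Dom_is_valid_moodys_rating_py rating → Spec_is_valid_moodys_rating_py rating (is_valid_moodys_rating_py rating)

-- ===== LEMMAS AND PROOFS =====

-- prefixes and suffixes as char lists
def pvPL : List (List Char) :=
  [['A','a','a'], ['A','a'], ['A'], ['B','a','a'], ['B','a'], ['B'], ['C','a','a'], ['C','a'], ['C']]
def pvSL : List (List Char) := [[], ['1'], ['2'], ['3']]

-- the common characterization: the rating is some base prefix plus an optional grade digit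
def pvGood (l : List Char) : Prop := ∃ p ∈ pvPL, ∃ suf ∈ pvSL, l = p ++ suf

lemma pv_toList_prefixes : pvValidPrefixes.map String.toList = pvPL := by decide

lemma pv_suffix_toList (s p : String) :
    (PySem.Str.slice s (some (PySem.Str.len p)) none).toList
      = s.toList.drop p.toList.length := by
  have h : PySem.Str.len p = ((p.toList.length : Nat) : Int) := by
    simp [PySem.Str.len]
  rw [PySem.Str.toList_slice, PySem.Chars.slice_eq_listSlice, h,
    PySem.List.slice_from_natCast]

lemma pv_mem_strlist (t : String) (l : List String) :
    l.contains t = true ↔ t.toList ∈ l.map String.toList := by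
  induction l with
  | nil => simp
  | cons x xs ih =>
      simp only [List.contains_cons, List.map_cons, List.mem_cons, Bool.or_eq_true, beq_iff_eq, ih]
      constructor
      · rintro (rfl | h)
        · exact Or.inl rfl
        · exact Or.inr h
      · rintro (h | h)
        · exact Or.inl (String.toList_inj.mp h.symm).symm
        · exact Or.inr h

lemma pv_loopA_iff (s : String) (l : List String) :
    pvLoopA s l = true ↔
      ∃ p ∈ l.map String.toList, ∃ suf ∈ pvSL, s.toList = p ++ suf := by
  induction l with
  | nil => simp [pvLoopA]
  | cons p rest ih =>
      simp only [pvLoopA, List.map_cons, List.mem_cons]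
      by_cases hsw : PySem.Str.startswith s p = true
      · rw [if_pos hsw]
        have hpre : p.toList <+: s.toList := by
          have := PySem.Str.startswith_eq s p
          rw [this] at hsw
          exact (PySem.Chars.startswith_iff _ _).mp hsw
        by_cases hmem : (["", "1", "2", "3"] : List String).contains
            (PySem.Str.slice s (some (PySem.Str.len p)) none) = true
        · rw [if_pos hmem]
          constructor
          · intro _
            rw [pv_mem_strlist] at hmem
            rw [pv_suffix_toList] at hmem
            refine ⟨p.toList, Or.inl rfl, s.toList.drop p.toList.length, ?_, ?_⟩
            · simpa [pvSL] using hmem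
            · obtain ⟨t, ht⟩ := hpre
              rw [← ht, List.drop_left]
          · intro _; rfl
        · rw [if_neg hmem, ih]
          constructor
          · rintro ⟨q, hq, suf, hsuf, heq⟩
            exact ⟨q, Or.inr hq, suf, hsuf, heq⟩
          · rintro ⟨q, hq | hq, suf, hsuf, heq⟩
            · -- this case contradicts hmem
              subst hq
              exfalso
              apply hmem
              rw [pv_mem_strlist, pv_suffix_toList, heq, List.drop_left]
              simpa [pvSL] using hsuf
            · exact ⟨q, hq, suf, hsuf, heq⟩
      · rw [if_neg hsw, ih]
        have hnpre : ¬ p.toList <+: s.toList := by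
          intro hc
          apply hsw
          rw [PySem.Str.startswith_eq s p]
          exact (PySem.Chars.startswith_iff _ _).mpr hc
        constructor
        · rintro ⟨q, hq, suf, hsuf, heq⟩
          exact ⟨q, Or.inr hq, suf, hsuf, heq⟩
        · rintro ⟨q, hq | hq, suf, hsuf, heq⟩
          · exact absurd ⟨suf, heq.symm⟩ (hq ▸ hnpre)
          · exact ⟨q, hq, suf, hsuf, heq⟩

lemma pv_A_iff (s : String) : is_valid_moodys_rating_py s = true ↔ pvGood s.toList := by
  rw [is_valid_moodys_rating_py, pv_loopA_iff, pv_toList_prefixes, pvGood]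

lemma pv_set_contains (t : String) :
    pvMoodysPrefixSet.contains t = true ↔ t.toList ∈ pvPL := by
  have : pvMoodysPrefixSet.contains t
      = (["Aaa", "Aa", "A", "Baa", "Ba", "B", "Caa", "Ca", "C"] : List String).contains t := by
    rfl
  rw [this, pv_mem_strlist]
  have h2 : (["Aaa", "Aa", "A", "Baa", "Ba", "B", "Caa", "Ca", "C"] : List String).map String.toList = pvPL := by decide
  rw [h2]

lemma pv_endswith_iff (s : String) (c : Char) (t : String) (ht : t.toList = [c]) :
    PySem.Str.endswith s t = true ↔ [c] <:+ s.toList := by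
  rw [PySem.Str.endswith_eq, ht]
  exact PySem.Chars.endswith_iff _ _

-- no base prefix ends in a grade digit
lemma pv_PL_last (p : List Char) (hp : p ∈ pvPL) (d : Char) (hd : d = '1' ∨ d = '2' ∨ d = '3') :
    ¬ [d] <:+ p := by
  rcases hd with rfl | rfl | rfl <;> (fin_cases hp <;> decide)

lemma pv_B_iff (s : String) : is_valid_moodys_rating_py_alt s = true ↔ pvGood s.toList := by
  rw [is_valid_moodys_rating_py_alt]
  by_cases hd : ([( '1' : Char)] <:+ s.toList) ∨ (['2'] <:+ s.toList) ∨ (['3'] <:+ s.toList)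
  · have hcond : (PySem.Str.endswith s "1" || PySem.Str.endswith s "2" || PySem.Str.endswith s "3") = true := by
      rcases hd with h | h | h
      · rw [(pv_endswith_iff s '1' "1" (by decide)).mpr h]; simp only [Bool.true_or]
      · rw [(pv_endswith_iff s '2' "2" (by decide)).mpr h]; simp only [Bool.or_true, Bool.true_or]
      · rw [(pv_endswith_iff s '3' "3" (by decide)).mpr h]; simp only [Bool.or_true]
    rw [if_pos hcond, pv_set_contains, PySem.Str.slice_to_neg_one]
    -- the last character is a grade digit d
    obtain ⟨d, hdmem, t, ht⟩ :
        ∃ d, (d = '1' ∨ d = '2' ∨ d = '3') ∧ ∃ t, t ++ [d] = s.toList := by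
      rcases hd with h | h | h
      · exact ⟨'1', Or.inl rfl, h⟩
      · exact ⟨'2', Or.inr (Or.inl rfl), h⟩
      · exact ⟨'3', Or.inr (Or.inr rfl), h⟩
    constructor
    · intro hmem
      refine ⟨s.toList.dropLast, hmem, [d], ?_, ?_⟩
      · rcases hdmem with rfl | rfl | rfl <;> simp [pvSL]
      · conv_lhs => rw [← ht]
        rw [← ht, List.dropLast_concat]
    · rintro ⟨p, hp, suf, hsuf, heq⟩
      have hsuf' : suf = [] ∨ suf = ['1'] ∨ suf = ['2'] ∨ suf = ['3'] := by
        simpa [pvSL] using hsuf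
      rcases hsuf' with rfl | rfl | rfl | rfl
      · -- suffix empty: s.toList = p, but p cannot end in a digit
        exfalso
        rw [List.append_nil] at heq
        exact pv_PL_last p hp d hdmem (heq ▸ ⟨t, ht⟩)
      all_goals
        rw [heq, List.dropLast_concat]; exact hp
  · have h1 : PySem.Str.endswith s "1" = false := by
      rw [Bool.eq_false_iff]; intro hc
      exact hd (Or.inl ((pv_endswith_iff s '1' "1" (by decide)).mp hc))
    have h2 : PySem.Str.endswith s "2" = false := by
      rw [Bool.eq_false_iff]; intro hc
      exact hd (Or.inr (Or.inl ((pv_endswith_iff s '2' "2" (by decide)).mp hc)))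
    have h3 : PySem.Str.endswith s "3" = false := by
      rw [Bool.eq_false_iff]; intro hc
      exact hd (Or.inr (Or.inr ((pv_endswith_iff s '3' "3" (by decide)).mp hc)))
    rw [h1, h2, h3]
    simp only [Bool.or_self]
    rw [if_neg Bool.false_ne_true, pv_set_contains]
    constructor
    · intro hmem
      exact ⟨s.toList, hmem, [], by simp [pvSL], by simp⟩
    · rintro ⟨p, hp, suf, hsuf, heq⟩
      have hsuf' : suf = [] ∨ suf = ['1'] ∨ suf = ['2'] ∨ suf = ['3'] := by
        simpa [pvSL] using hsuf
      rcases hsuf' with rfl | rfl | rfl | rfl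
      · rw [List.append_nil] at heq; exact heq ▸ hp
      · exact absurd (Or.inl (heq ▸ ⟨p, rfl⟩)) hd
      · exact absurd (Or.inr (Or.inl (heq ▸ ⟨p, rfl⟩))) hd
      · exact absurd (Or.inr (Or.inr (heq ▸ ⟨p, rfl⟩))) hd

-- ===== VERDICT (by name: the statement is the Claim_ definition above) =====
theorem is_valid_moodys_rating_py_spec : Claim_equal_is_valid_moodys_rating_py := by
  intro rating _
  unfold Spec_is_valid_moodys_rating_py
  rw [Bool.eq_iff_iff, pv_A_iff, pv_B_iff]
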